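-- pv_equiv track=rewrite | github.com/Taepoung/Jump2Paper | hooks/scripts/check_output.py | _check_bracket_balance
-- ===== SOURCE A (Python) =====
-- def _check_bracket_balance(code: str, label: str) -> str | None:
--     """괄호 균형 검사. 문자열 내부는 건너뜀."""
--     stack = []
--     pairs = {")": "(", "]": "[", "}": "{"}
--     in_str = None
--     i = 0
--
--     while i < len(code):
--         ch = code[i]
--
--         # 문자열 이스케이프
--         if in_str and ch == "\\" and i + 1 < len(code):
--             i += 2
--             continue
--
--         # 문자열 진입/탈출
--         if ch in ('"', "'") and in_str is None:
--             in_str = ch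
--             i += 1
--             continue
--         if ch == in_str:
--             in_str = None
--             i += 1
--             continue
--         if in_str:
--             i += 1
--             continue
--
--         # 템플릿 리터럴은 단순 스킵 (중첩 복잡해서 별도 처리)
--         if ch == "`":
--             end = code.find("`", i + 1)
--             i = end + 1 if end != -1 else len(code)
--             continue
--
--         # 한 줄 주석
--         if ch == "/" and i + 1 < len(code) and code[i + 1] == "/":
--             nl = code.find("\n", i)
--             i = nl + 1 if nl != -1 else len(code)
--             continue
--
--         # 블록 주석
--         if ch == "/" and i + 1 < len(code) and code[i + 1] == "*":
--             end = code.find("*/", i + 2)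
--             i = end + 2 if end != -1 else len(code)
--             continue
--
--         if ch in ("(", "[", "{"):
--             stack.append((ch, i))
--         elif ch in (")", "]", "}"):
--             if stack and stack[-1][0] == pairs[ch]:
--                 stack.pop()
--             else:
--                 line = code[:i].count("\n") + 1
--                 return f"[JS 문법 오류] {label} — 라인 {line}: 예상치 못한 '{ch}' (짝 없음)"
--         i += 1
--
--     if stack:
--         ch, pos = stack[-1]
--         line = code[:pos].count("\n") + 1
--         return f"[JS 문법 오류] {label} — 라인 {line}: '{ch}' 가 닫히지 않음"
--
--     return None
-- ===== SOURCE B (Python) =====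
-- def _skip_string(code, j, quote, line):
--     """Skip a string literal body starting at j (just after the opening quote).
--     Returns (index after the closing quote or len, updated line count)."""
--     n = len(code)
--     while j < n:
--         c = code[j]
--         if c == "\\" and j + 1 < n:
--             if code[j + 1] == "\n":
--                 line += 1
--             j += 2
--         elif c == quote:
--             return j + 1, line
--         else:
--             if c == "\n":
--                 line += 1
--             j += 1
--     return n, line
--
--
-- def _skip_to(code, j, target, line):
--     """Skip up to and including the first `target` at or after j."""
--     n = len(code)
--     while j < n:
--         c = code[j]
--         if c == "\n":
--             line += 1
--         if c == target:
--             return j + 1, line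
--         j += 1
--     return n, line
--
--
-- def _skip_block(code, j, line):
--     """Skip up to and past the first '*/' at or after j."""
--     n = len(code)
--     while j < n:
--         if code[j] == "*" and j + 1 < n and code[j + 1] == "/":
--             return j + 2, line
--         if code[j] == "\n":
--             line += 1
--         j += 1
--     return n, line
--
--
-- def _tokenize(code):
--     """Lex pass: the brackets of real code, each with its (1-based) line number."""
--     toks = []
--     line = 1
--     i = 0
--     n = len(code)
--     while i < n:
--         ch = code[i]
--         if ch == "\n":
--             line += 1
--             i += 1
--         elif ch == '"' or ch == "'":
--             i, line = _skip_string(code, i + 1, ch, line)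
--         elif ch == "`":
--             i, line = _skip_to(code, i + 1, "`", line)
--         elif ch == "/" and code.startswith("//", i):
--             i, line = _skip_to(code, i + 1, "\n", line)
--         elif ch == "/" and code.startswith("/*", i):
--             i, line = _skip_block(code, i + 2, line)
--         else:
--             if ch in "()[]{}":
--                 toks.append((ch, line))
--             i += 1
--     return toks
--
--
-- def _check_bracket_balance(code: str, label: str) -> str | None:
--     pairs = {")": "(", "]": "[", "}": "{"}
--     stack = []
--     for ch, line in _tokenize(code):
--         if ch in pairs:
--             if stack and stack[-1][0] == pairs[ch]:
--                 stack.pop()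
--             else:
--                 return f"[JS 문법 오류] {label} — 라인 {line}: 예상치 못한 '{ch}' (짝 없음)"
--         else:
--             stack.append((ch, line))
--     if stack:
--         ch, line = stack[-1]
--         return f"[JS 문법 오류] {label} — 라인 {line}: '{ch}' 가 닫히지 않음"
--     return None
-- ===== Notes on version B (the rewrite author's own statement) =====
-- stated objective: alternative
-- what changed: A interleaves bracket matching inside one scan and recomputes the line by slicing code[:i].count(' ') on error; B is two differently-shaped passes: a lexer with dedicated skip-loops for strings/template literals/comments that emits each real-code bracket already tagged with an incrementally tracked line number, then a stack pass over that token list that never touches the source again.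
import Mathlib
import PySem

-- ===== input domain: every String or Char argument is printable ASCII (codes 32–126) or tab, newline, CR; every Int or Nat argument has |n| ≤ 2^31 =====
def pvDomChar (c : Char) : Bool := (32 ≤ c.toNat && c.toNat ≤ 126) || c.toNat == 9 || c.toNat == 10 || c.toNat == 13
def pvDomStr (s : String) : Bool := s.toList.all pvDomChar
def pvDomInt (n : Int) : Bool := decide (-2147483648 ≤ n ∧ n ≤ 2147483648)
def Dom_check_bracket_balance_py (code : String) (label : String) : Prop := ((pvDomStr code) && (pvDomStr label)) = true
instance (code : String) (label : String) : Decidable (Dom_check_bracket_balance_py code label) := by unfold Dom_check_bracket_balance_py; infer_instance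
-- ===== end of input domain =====

-- B replaces A's single interleaved scan (match brackets inline, recompute the line by
-- slicing code[:i] on error) by two passes: a lexer that emits each real-code bracket
-- already tagged with its line number (tracked incrementally, strings/templates/comments
-- skipped by dedicated helper loops), then a stack pass over that token list.
-- Objective: alternative decomposition (no speed claim).

def pvPairOf (ch : Char) : Char :=
  if ch = ')' then '(' else if ch = ']' then '[' else '{'

-- ===== PORT A =====
-- A's messages: the line is recomputed as code[:pos].count("\n") + 1.
def pvMsgAUnexpected (label : String) (cs : List Char) (i : Nat) (ch : Char) : String :=
  "[JS 문법 오류] " ++ label ++ " — 라인 " ++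
    PySem.Int.toStr ((PySem.Chars.count (cs.take i) ['\n'] : Int) + 1) ++
    ": 예상치 못한 '" ++ String.ofList [ch] ++ "' (짝 없음)"

def pvMsgAUnclosed (label : String) (cs : List Char) (pos : Nat) (ch : Char) : String :=
  "[JS 문법 오류] " ++ label ++ " — 라인 " ++
    PySem.Int.toStr ((PySem.Chars.count (cs.take pos) ['\n'] : Int) + 1) ++
    ": '" ++ String.ofList [ch] ++ "' 가 닫히지 않음"

-- A's while-loop; `rest = cs.drop i` throughout, so code.find(sub, k) is transliterated
-- as PySem.Chars.find on the corresponding suffix (exact: find from k = k + find on drop k).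
def pvLoopA (label : String) (cs : List Char) (stack : List (Char × Nat))
    (inStr : Option Char) (i : Nat) (rest : List Char) : Option String :=
  match rest with
  | [] =>
    match stack with
    | (ch, pos) :: _ => some (pvMsgAUnclosed label cs pos ch)   -- stack[-1] = head (push = cons)
    | [] => none
  | ch :: t =>
    if inStr.isSome ∧ ch = '\\' ∧ t ≠ [] then
      pvLoopA label cs stack inStr (i + 2) (t.drop 1)
    else if (ch = '"' ∨ ch = '\'') ∧ inStr = none then
      pvLoopA label cs stack (some ch) (i + 1) t
    else if some ch = inStr then
      pvLoopA label cs stack none (i + 1) t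
    else if inStr.isSome then
      pvLoopA label cs stack inStr (i + 1) t
    else if ch = '`' then
      -- e := code.find("`", i+1), computed relative to i+1
      if PySem.Chars.find t ['`'] ≠ -1 then
        pvLoopA label cs stack inStr (i + 2 + (PySem.Chars.find t ['`']).toNat)
          (t.drop ((PySem.Chars.find t ['`']).toNat + 1))
      else pvLoopA label cs stack inStr cs.length []
    else if ch = '/' ∧ t.head? = some '/' then
      -- nl := code.find("\n", i), computed relative to i
      if PySem.Chars.find (ch :: t) ['\n'] ≠ -1 then
        pvLoopA label cs stack inStr (i + (PySem.Chars.find (ch :: t) ['\n']).toNat + 1)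
          ((ch :: t).drop ((PySem.Chars.find (ch :: t) ['\n']).toNat + 1))
      else pvLoopA label cs stack inStr cs.length []
    else if ch = '/' ∧ t.head? = some '*' then
      -- e := code.find("*/", i+2), computed relative to i+2
      if PySem.Chars.find (t.drop 1) ['*', '/'] ≠ -1 then
        pvLoopA label cs stack inStr (i + 4 + (PySem.Chars.find (t.drop 1) ['*', '/']).toNat)
          (t.drop ((PySem.Chars.find (t.drop 1) ['*', '/']).toNat + 3))
      else pvLoopA label cs stack inStr cs.length []
    else if ch = '(' ∨ ch = '[' ∨ ch = '{' then
      pvLoopA label cs ((ch, i) :: stack) inStr (i + 1) t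
    else if ch = ')' ∨ ch = ']' ∨ ch = '}' then
      match stack with
      | (top, _) :: s' =>
        if top = pvPairOf ch then pvLoopA label cs s' inStr (i + 1) t
        else some (pvMsgAUnexpected label cs i ch)
      | [] => some (pvMsgAUnexpected label cs i ch)
    else
      pvLoopA label cs stack inStr (i + 1) t
  termination_by rest.length
  decreasing_by all_goals simp [List.length_drop]

def check_bracket_balance_py (code : String) (label : String) : Option String :=
  pvLoopA label code.toList [] none 0 code.toList

-- ===== PORT B =====
-- B's messages take the line number directly.
def pvMsgBUnexpected (label : String) (line : Int) (ch : Char) : String :=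
  "[JS 문법 오류] " ++ label ++ " — 라인 " ++ PySem.Int.toStr line ++
    ": 예상치 못한 '" ++ String.ofList [ch] ++ "' (짝 없음)"

def pvMsgBUnclosed (label : String) (line : Int) (ch : Char) : String :=
  "[JS 문법 오류] " ++ label ++ " — 라인 " ++ PySem.Int.toStr line ++
    ": '" ++ String.ofList [ch] ++ "' 가 닫히지 않음"

-- _skip_string: body of a quoted string; returns (updated line, rest after closing quote)
def pvSkipStr (quote : Char) (line : Int) : List Char → Int × List Char
  | [] => (line, [])
  | c :: t =>
    if c = '\\' ∧ t ≠ [] then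
      pvSkipStr quote (if t.head? = some '\n' then line + 1 else line) (t.drop 1)
    else if c = quote then (line, t)
    else pvSkipStr quote (if c = '\n' then line + 1 else line) t
  termination_by rest => rest.length
  decreasing_by all_goals simp [List.length_drop]

-- _skip_to: up to and including the first `target`
def pvSkipTo (target : Char) (line : Int) : List Char → Int × List Char
  | [] => (line, [])
  | c :: t =>
    if c = target then ((if c = '\n' then line + 1 else line), t)
    else pvSkipTo target (if c = '\n' then line + 1 else line) t

-- _skip_block: up to and past the first "*/"
def pvSkipBlock (line : Int) : List Char → Int × List Char
  | [] => (line, [])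
  | c :: t =>
    if c = '*' ∧ t.head? = some '/' then (line, t.drop 1)
    else pvSkipBlock (if c = '\n' then line + 1 else line) t

lemma pvSkipStr_len (quote : Char) (line : Int) (xs : List Char) :
    (pvSkipStr quote line xs).2.length ≤ xs.length := by
  fun_induction pvSkipStr quote line xs <;> simp_all <;> omega

lemma pvSkipTo_len (target : Char) (line : Int) (xs : List Char) :
    (pvSkipTo target line xs).2.length ≤ xs.length := by
  fun_induction pvSkipTo target line xs <;> simp_all <;> omega

lemma pvSkipBlock_len (line : Int) (xs : List Char) :
    (pvSkipBlock line xs).2.length ≤ xs.length := by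
  fun_induction pvSkipBlock line xs <;> simp_all <;> omega

-- _tokenize: every bracket of real code, tagged with its 1-based line number
def pvTokenize (line : Int) : List Char → List (Char × Int)
  | [] => []
  | c :: t =>
    if c = '\n' then pvTokenize (line + 1) t
    else if c = '"' ∨ c = '\'' then
      pvTokenize (pvSkipStr c line t).1 (pvSkipStr c line t).2
    else if c = '`' then
      pvTokenize (pvSkipTo '`' line t).1 (pvSkipTo '`' line t).2
    else if c = '/' ∧ t.head? = some '/' then
      pvTokenize (pvSkipTo '\n' line t).1 (pvSkipTo '\n' line t).2
    else if c = '/' ∧ t.head? = some '*' then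
      pvTokenize (pvSkipBlock line (t.drop 1)).1 (pvSkipBlock line (t.drop 1)).2
    else if c = '(' ∨ c = ')' ∨ c = '[' ∨ c = ']' ∨ c = '{' ∨ c = '}' then
      (c, line) :: pvTokenize line t
    else pvTokenize line t
  termination_by rest => rest.length
  decreasing_by
  · simp
  · have := pvSkipStr_len c line t; simp; omega
  · have := pvSkipTo_len '`' line t; simp; omega
  · have := pvSkipTo_len '\n' line t; simp; omega
  · have := pvSkipBlock_len line (t.drop 1); simp [List.length_drop] at *; omega
  · simp
  · simp

-- second pass: stack matching over the token list
def pvMatchB (label : String) (stack : List (Char × Int)) : List (Char × Int) → Option String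
  | [] =>
    match stack with
    | (ch, line) :: _ => some (pvMsgBUnclosed label line ch)
    | [] => none
  | (ch, line) :: toks =>
    if ch = ')' ∨ ch = ']' ∨ ch = '}' then
      match stack with
      | (top, _) :: s' =>
        if top = pvPairOf ch then pvMatchB label s' toks
        else some (pvMsgBUnexpected label line ch)
      | [] => some (pvMsgBUnexpected label line ch)
    else pvMatchB label ((ch, line) :: stack) toks

def check_bracket_balance_py_alt (code : String) (label : String) : Option String :=
  pvMatchB label [] (pvTokenize 1 code.toList)

-- ===== PRECONDITION & SPEC =====
def Spec_check_bracket_balance_py (code : String) (label : String) (out : Option String) : Prop := out = check_bracket_balance_py_alt code label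
instance (code : String) (label : String) (out : Option String) : Decidable (Spec_check_bracket_balance_py code label out) := by unfold Spec_check_bracket_balance_py; infer_instance

-- ===== CLAIM (what is proved, stated in full; the proofs are below) =====
def Claim_equal_check_bracket_balance_py : Prop := ∀ (code : String) (label : String), Dom_check_bracket_balance_py code label → Spec_check_bracket_balance_py code label (check_bracket_balance_py code label)

-- ===== LEMMAS AND PROOFS =====

-- the line number A recomputes at index i: code[:i].count("\n") + 1
def pvLineAt (cs : List Char) (i : Nat) : Int := ((cs.take i).count '\n' : Int) + 1

def pvMapStk (cs : List Char) (sa : List (Char × Nat)) : List (Char × Int) :=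
  sa.map (fun p => (p.1, pvLineAt cs p.2))

-- B's residual tokenizer state corresponding to A's in_str mode
def pvTokSt (inStr : Option Char) (line : Int) (rest : List Char) : List (Char × Int) :=
  match inStr with
  | none => pvTokenize line rest
  | some q => pvTokenize (pvSkipStr q line rest).1 (pvSkipStr q line rest).2

lemma pvGoCount (c : Char) : ∀ (fuel : Nat) (l : List Char) (acc : Nat), l.length ≤ fuel →
    PySem.Chars.count.go [c] fuel l acc = acc + l.count c := by
  intro fuel
  induction fuel with
  | zero =>
    intro l acc h
    have : l = [] := List.length_eq_zero_iff.mp (Nat.le_zero.mp h)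
    subst this; simp [PySem.Chars.count.go]
  | succ n ih =>
    intro l acc h
    match l with
    | [] => simp [PySem.Chars.count.go]
    | x :: t =>
      rw [PySem.Chars.count.go]
      have hp : ([c].isPrefixOf (x :: t)) = (c == x) := by simp [List.isPrefixOf]
      rw [hp]
      by_cases hx : c = x
      · subst hx
        simp only [BEq.rfl, if_true]
        have hd : List.drop [c].length (c :: t) = t := by simp
        rw [hd, ih t (acc + 1) (by simp at h; omega)]
        simp [List.count_cons]; omega
      · rw [if_neg (by simpa using hx)]
        rw [ih t acc (by simp at h; omega)]
        simp [List.count_cons]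
        intro hh; exact absurd hh.symm hx
lemma pvCountNl (xs : List Char) : PySem.Chars.count xs ['\n'] = xs.count '\n' := by
  rw [PySem.Chars.count]
  simp [pvGoCount '\n' xs.length xs 0 le_rfl]

lemma pvLineAt_add (cs : List Char) (i m : Nat) :
    pvLineAt cs (i + m) = pvLineAt cs i + (((cs.drop i).take m).count '\n' : Int) := by
  unfold pvLineAt
  rw [List.take_add, List.count_append]
  push_cast; ring
lemma pvFindGoLB (sub : List Char) (t : List Char) : ∀ (k : Nat),
    PySem.Chars.find.go sub t k = -1 ∨ (k : Int) ≤ PySem.Chars.find.go sub t k := by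
  induction t with
  | nil => intro k; rw [PySem.Chars.find.go]; split_ifs <;> simp
  | cons h t ih =>
    intro k
    rw [PySem.Chars.find.go]
    split_ifs with hp
    · right; simp
    · rcases ih (k+1) with h1 | h1
      · left; exact h1
      · right; omega
lemma pvFindGoShift (sub : List Char) (t : List Char) : ∀ (k : Nat),
    PySem.Chars.find.go sub t k =
      if PySem.Chars.find.go sub t 0 = -1 then -1 else PySem.Chars.find.go sub t 0 + k := by
  induction t with
  | nil => intro k; rw [PySem.Chars.find.go, PySem.Chars.find.go]; split_ifs <;> simp_all
  | cons h t ih =>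
    intro k
    rw [PySem.Chars.find.go]
    conv_rhs => rw [PySem.Chars.find.go]
    by_cases hp : sub.isPrefixOf (h :: t)
    · simp [hp]
    · simp only [hp, if_false]
      rw [ih (k+1), ih 1]
      rcases pvFindGoLB sub t 0 with hlb | hlb
      · simp [hlb]
      · split_ifs <;> push_cast at * <;> omega
lemma pvFindNil (sub : List Char) (hne : sub ≠ []) : PySem.Chars.find [] sub = -1 := by
  rw [PySem.Chars.find, PySem.Chars.find.go]
  simp [List.isEmpty_iff, hne]
lemma pvFindCons (h : Char) (t : List Char) (sub : List Char) :
    PySem.Chars.find (h :: t) sub =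
      if sub.isPrefixOf (h :: t) then 0
      else if PySem.Chars.find t sub = -1 then -1 else PySem.Chars.find t sub + 1 := by
  rw [PySem.Chars.find, PySem.Chars.find.go]
  by_cases hp : sub.isPrefixOf (h :: t)
  · simp [hp]
  · rw [if_neg hp, if_neg hp, pvFindGoShift]
    have h2 : PySem.Chars.find t sub = PySem.Chars.find.go sub t 0 := rfl
    rw [← h2]
    by_cases h0 : PySem.Chars.find t sub = -1
    · simp [h0]
    · rw [if_neg h0, if_neg h0]
      norm_num

lemma pvFindLB (sub : List Char) (t : List Char) :
    PySem.Chars.find t sub = -1 ∨ 0 ≤ PySem.Chars.find t sub := by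
  have := pvFindGoLB sub t 0
  simpa [PySem.Chars.find] using this

lemma pvPrefOne (c tgt : Char) (t : List Char) :
    ([tgt].isPrefixOf (c :: t)) = (tgt == c) := by
  simp [List.isPrefixOf]

lemma pvPrefTwo (c : Char) (t : List Char) :
    (['*', '/'].isPrefixOf (c :: t) = true) ↔ (c = '*' ∧ t.head? = some '/') := by
  cases t <;> simp [List.isPrefixOf] <;> aesop

lemma pvSkipTo_notfound (target : Char) (line : Int) (xs : List Char)
    (h : PySem.Chars.find xs [target] = -1) :
    pvSkipTo target line xs = (line + (xs.count '\n' : Int), []) := by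
  induction xs generalizing line with
  | nil => simp [pvSkipTo]
  | cons c t ih =>
    rw [pvFindCons, pvPrefOne] at h
    rw [pvSkipTo]
    by_cases hc : c = target
    · rw [if_pos (by simp [hc])] at h; omega
    · rw [if_neg (by simp [Ne.symm hc])] at h
      have ht : PySem.Chars.find t [target] = -1 := by
        by_cases hf : PySem.Chars.find t [target] = -1
        · exact hf
        · rw [if_neg hf] at h
          rcases pvFindLB [target] t with h1 | h1
          · exact absurd h1 hf
          · omega
      rw [if_neg hc, ih _ ht]
      by_cases hn : c = '\n' <;> simp [hn, List.count_cons] <;> push_cast <;> ring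

lemma pvSkipTo_found (target : Char) (line : Int) (xs : List Char) (k : Nat)
    (h : PySem.Chars.find xs [target] = (k : Int)) :
    pvSkipTo target line xs =
      (line + ((xs.take (k + 1)).count '\n' : Int), xs.drop (k + 1)) := by
  induction xs generalizing line k with
  | nil => rw [pvFindNil [target] (by simp)] at h; omega
  | cons c t ih =>
    rw [pvFindCons, pvPrefOne] at h
    rw [pvSkipTo]
    by_cases hc : c = target
    · rw [if_pos (by simp [hc])] at h
      have hk : k = 0 := by omega
      subst hk
      rw [if_pos hc]
      by_cases hn : c = '\n' <;> simp [hn, List.count_cons] <;> ring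
    · rw [if_neg (by simp [Ne.symm hc])] at h
      have hnn : 0 ≤ PySem.Chars.find t [target] := by
        rcases pvFindLB [target] t with h1 | h1
        · rw [if_pos h1] at h; omega
        · exact h1
      rw [if_neg (by omega)] at h
      have hk1 : 1 ≤ k := by omega
      have hk' : PySem.Chars.find t [target] = ((k - 1 : Nat) : Int) := by
        push_cast; omega
      rw [if_neg hc, ih _ _ hk']
      have hsplit : k + 1 = (k - 1 + 1) + 1 := by omega
      rw [hsplit]
      have htake : (c :: t).take ((k - 1 + 1) + 1) = c :: t.take (k - 1 + 1) := rfl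
      have hdrop : (c :: t).drop ((k - 1 + 1) + 1) = t.drop (k - 1 + 1) := rfl
      rw [htake, hdrop]
      by_cases hn : c = '\n' <;> simp [hn, List.count_cons] <;> ring

lemma pvSkipBlock_notfound (line : Int) (xs : List Char)
    (h : PySem.Chars.find xs ['*', '/'] = -1) :
    pvSkipBlock line xs = (line + (xs.count '\n' : Int), []) := by
  induction xs generalizing line with
  | nil => simp [pvSkipBlock]
  | cons c t ih =>
    rw [pvFindCons] at h
    rw [pvSkipBlock]
    by_cases hp : c = '*' ∧ t.head? = some '/'
    · rw [if_pos ((pvPrefTwo c t).mpr hp)] at h; omega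
    · rw [if_neg (fun hh => hp ((pvPrefTwo c t).mp hh))] at h
      have ht : PySem.Chars.find t ['*', '/'] = -1 := by
        by_cases hf : PySem.Chars.find t ['*', '/'] = -1
        · exact hf
        · rw [if_neg hf] at h
          rcases pvFindLB ['*', '/'] t with h1 | h1
          · exact absurd h1 hf
          · omega
      rw [if_neg hp, ih _ ht]
      by_cases hn : c = '\n' <;> simp [hn, List.count_cons] <;> push_cast <;> ring

lemma pvSkipBlock_found (line : Int) (xs : List Char) (k : Nat)
    (h : PySem.Chars.find xs ['*', '/'] = (k : Int)) :
    pvSkipBlock line xs =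
      (line + ((xs.take k).count '\n' : Int), xs.drop (k + 2)) := by
  induction xs generalizing line k with
  | nil => rw [pvFindNil ['*', '/'] (by simp)] at h; omega
  | cons c t ih =>
    rw [pvFindCons] at h
    rw [pvSkipBlock]
    by_cases hp : c = '*' ∧ t.head? = some '/'
    · rw [if_pos ((pvPrefTwo c t).mpr hp)] at h
      have hk : k = 0 := by omega
      subst hk
      rw [if_pos hp]
      simp
    · rw [if_neg (fun hh => hp ((pvPrefTwo c t).mp hh))] at h
      have hnn : 0 ≤ PySem.Chars.find t ['*', '/'] := by
        rcases pvFindLB ['*', '/'] t with h1 | h1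
        · rw [if_pos h1] at h; omega
        · exact h1
      rw [if_neg (by omega)] at h
      have hk1 : 1 ≤ k := by omega
      have hk' : PySem.Chars.find t ['*', '/'] = ((k - 1 : Nat) : Int) := by
        push_cast; omega
      obtain ⟨k', rfl⟩ : ∃ k', k = k' + 1 := ⟨k - 1, by omega⟩
      have hk'' : PySem.Chars.find t ['*', '/'] = (k' : Int) := by push_cast at hk' ⊢; omega
      rw [if_neg hp, ih _ _ hk'']
      by_cases hn : c = '\n' <;> simp [hn, List.count_cons] <;> push_cast <;> ring

lemma pvMsgA_eq_B_unexpected (label : String) (cs : List Char) (i : Nat) (ch : Char) :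
    pvMsgAUnexpected label cs i ch = pvMsgBUnexpected label (pvLineAt cs i) ch := by
  simp [pvMsgAUnexpected, pvMsgBUnexpected, pvLineAt, pvCountNl]

lemma pvMsgA_eq_B_unclosed (label : String) (cs : List Char) (pos : Nat) (ch : Char) :
    pvMsgAUnclosed label cs pos ch = pvMsgBUnclosed label (pvLineAt cs pos) ch := by
  simp [pvMsgAUnclosed, pvMsgBUnclosed, pvLineAt, pvCountNl]

-- small facts about the moving index/rest/line state
lemma pvTokSt_nil (inStr : Option Char) (line : Int) : pvTokSt inStr line [] = [] := by
  cases inStr <;> simp [pvTokSt, pvSkipStr, pvTokenize]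

lemma pvDropSucc {cs : List Char} {i : Nat} {ch : Char} {t : List Char}
    (h : ch :: t = cs.drop i) : t = cs.drop (i + 1) := by
  have h2 := congrArg List.tail h
  simpa [List.tail_drop] using h2

lemma pvDropAdd {cs : List Char} {i : Nat} {ch : Char} {t : List Char}
    (h : ch :: t = cs.drop i) (m : Nat) : t.drop m = cs.drop (i + 1 + m) := by
  rw [show t = cs.drop (i+1) from pvDropSucc h, List.drop_drop]

lemma pvLineAtStep {cs : List Char} {i : Nat} {ch : Char} {t : List Char}
    (h : ch :: t = cs.drop i) :
    pvLineAt cs (i + 1) = if ch = '\n' then pvLineAt cs i + 1 else pvLineAt cs i := by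
  rw [pvLineAt_add cs i 1, ← h]
  by_cases hn : ch = '\n' <;> simp [hn]

lemma pvLineAtJump {cs : List Char} {i : Nat} {ch : Char} {t : List Char}
    (h : ch :: t = cs.drop i) (m : Nat) :
    pvLineAt cs (i + 1 + m) = pvLineAt cs (i + 1) + ((t.take m).count '\n' : Int) := by
  rw [pvLineAt_add cs (i+1) m, ← pvDropSucc h]

lemma pvFindNat (sub t : List Char) (h : PySem.Chars.find t sub ≠ -1) :
    PySem.Chars.find t sub = (((PySem.Chars.find t sub).toNat : Nat) : Int) := by
  rcases pvFindLB sub t with h1 | h1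
  · exact absurd h1 h
  · exact (Int.toNat_of_nonneg h1).symm

-- one-step unfoldings of pvTokenize by character class
lemma pvTok_nil (line : Int) : pvTokenize line [] = [] := by rw [pvTokenize]

lemma pvTok_nl (line : Int) (t : List Char) :
    pvTokenize line ('\n' :: t) = pvTokenize (line + 1) t := by
  rw [pvTokenize]; rw [if_pos rfl]

lemma pvTok_quote (line : Int) (c : Char) (t : List Char) (hq : c = '"' ∨ c = '\'') :
    pvTokenize line (c :: t) = pvTokenize (pvSkipStr c line t).1 (pvSkipStr c line t).2 := by
  rcases hq with rfl | rfl <;> (rw [pvTokenize]; rw [if_neg (by decide), if_pos (by simp)])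

lemma pvTok_bq (line : Int) (t : List Char) :
    pvTokenize line ('`' :: t) = pvTokenize (pvSkipTo '`' line t).1 (pvSkipTo '`' line t).2 := by
  rw [pvTokenize]; rw [if_neg (by decide), if_neg (by decide), if_pos rfl]

lemma pvTok_sl (line : Int) (t : List Char) (hd : t.head? = some '/') :
    pvTokenize line ('/' :: t) = pvTokenize (pvSkipTo '\n' line t).1 (pvSkipTo '\n' line t).2 := by
  rw [pvTokenize]
  rw [if_neg (by decide), if_neg (by decide), if_neg (by decide), if_pos ⟨rfl, hd⟩]

lemma pvTok_bl (line : Int) (t : List Char) (hd : t.head? = some '*') :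
    pvTokenize line ('/' :: t) =
      pvTokenize (pvSkipBlock line (t.drop 1)).1 (pvSkipBlock line (t.drop 1)).2 := by
  rw [pvTokenize]
  rw [if_neg (by decide), if_neg (by decide), if_neg (by decide),
      if_neg (by rintro ⟨-, h⟩; rw [hd] at h; exact absurd (Option.some.inj h) (by decide)),
      if_pos ⟨rfl, hd⟩]

lemma pvTok_ord (line : Int) (c : Char) (t : List Char) (hn : ¬c = '\n')
    (hq : ¬(c = '"' ∨ c = '\'')) (hb : ¬c = '`')
    (hs1 : ¬(c = '/' ∧ t.head? = some '/')) (hs2 : ¬(c = '/' ∧ t.head? = some '*')) :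
    pvTokenize line (c :: t) =
      if c = '(' ∨ c = ')' ∨ c = '[' ∨ c = ']' ∨ c = '{' ∨ c = '}' then
        (c, line) :: pvTokenize line t
      else pvTokenize line t := by
  rw [pvTokenize]; rw [if_neg hn, if_neg hq, if_neg hb, if_neg hs1, if_neg hs2]

-- main correspondence: A's interleaved loop = B's tokenize-then-match, with the
-- incremental line equal to the recomputed one and the stacks related by pvMapStk
lemma pvMain (label : String) (cs : List Char) (sa : List (Char × Nat))
    (inStr : Option Char) (i : Nat) (rest : List Char)
    (hok : inStr = none ∨ inStr = some '"' ∨ inStr = some '\'')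
    (hrest : rest = cs.drop i) :
    pvLoopA label cs sa inStr i rest =
      pvMatchB label (pvMapStk cs sa) (pvTokSt inStr (pvLineAt cs i) rest) := by
  revert hok hrest
  fun_induction pvLoopA label cs sa inStr i rest
  case case1 =>
    intro hok hrest
    rw [pvTokSt_nil]
    simp [pvMapStk, pvMatchB, pvMsgA_eq_B_unclosed]
  case case2 =>
    intro hok hrest
    rw [pvTokSt_nil]
    simp [pvMapStk, pvMatchB]
  case case3 ih =>  -- escape inside a string
    rename_i stack inStr i ch t hcond
    intro hok hrest
    obtain ⟨hsome, rfl, hne⟩ := hcond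
    rcases hok with rfl | rfl | rfl
    · simp at hsome
    all_goals {
      obtain ⟨h2, t2, rfl⟩ : ∃ h2 t2, t = h2 :: t2 := by
        cases t with
        | nil => exact absurd rfl hne
        | cons a b => exact ⟨a, b, rfl⟩
      rw [ih (by simp) (pvDropAdd hrest 1)]
      simp only [pvTokSt]
      conv_rhs => rw [pvSkipStr]
      rw [if_pos ⟨rfl, hne⟩]
      have e1 := pvLineAtStep hrest
      rw [if_neg (by decide)] at e1
      have e2 := pvLineAtStep (pvDropSucc hrest)
      rw [e1] at e2
      have hl : pvLineAt cs (i + 2) =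
          if ('\\' :: h2 :: t2).tail.head? = some '\n' then pvLineAt cs i + 1
          else pvLineAt cs i := by
        simp only [List.tail_cons, List.head?_cons]
        rw [show i + 2 = i + 1 + 1 from rfl, e2]
        by_cases hh : h2 = '\n' <;> simp [hh]
      rw [hl]
      simp
    }
  case case4 ih =>  -- entering a string
    rename_i stack inStr i ch t hesc hcond
    intro hok hrest
    obtain ⟨hq, rfl⟩ := hcond
    rw [ih (by rcases hq with rfl | rfl <;> simp) (pvDropSucc hrest)]
    have hl : pvLineAt cs (i + 1) = pvLineAt cs i := by
      rw [pvLineAtStep hrest]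
      rcases hq with rfl | rfl <;> rw [if_neg (by decide)]
    rw [hl]
    simp only [pvTokSt]
    rw [pvTok_quote _ _ _ hq]
  case case5 ih =>  -- leaving a string
    rename_i stack i ch t hesc hq
    intro hok hrest
    have hquote : ch = '"' ∨ ch = '\'' := by
      rcases hok with h | h | h
      · simp at h
      · exact Or.inl (by simpa using h)
      · exact Or.inr (by simpa using h)
    rw [ih (Or.inl rfl) (pvDropSucc hrest)]
    have hl : pvLineAt cs (i + 1) = pvLineAt cs i := by
      rw [pvLineAtStep hrest]
      rcases hquote with rfl | rfl <;> rw [if_neg (by decide)]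
    rw [hl]
    simp only [pvTokSt]
    conv_rhs => rw [pvSkipStr]
    rw [if_neg (by rcases hquote with rfl | rfl <;> simp), if_pos rfl]
  case case6 ih =>  -- ordinary character inside a string
    rename_i stack inStr i ch t hesc hq hexit hsome
    intro hok hrest
    rcases hok with rfl | rfl | rfl
    · simp at hsome
    all_goals {
      rw [ih (by simp) (pvDropSucc hrest)]
      simp only [pvTokSt]
      conv_rhs => rw [pvSkipStr]
      rw [if_neg (by intro hh; exact hesc ⟨by simp, hh⟩),
          if_neg (by intro hh; exact hexit (by rw [hh])), ← pvLineAtStep hrest]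
    }
  case case7 ih =>  -- template literal with a closing backtick
    rename_i stack inStr i t hsome hfound hesc hq hexit
    intro hok hrest
    have hnone : inStr = none := by rcases hok with rfl | rfl | rfl <;> simp_all
    subst hnone
    set k : Nat := (PySem.Chars.find t ['`']).toNat with hk
    have hfk : PySem.Chars.find t ['`'] = (k : Int) := pvFindNat _ _ hfound
    rw [ih (Or.inl rfl) (by rw [show i + 2 + k = i + 1 + (k + 1) from by omega]
                            exact pvDropAdd hrest (k + 1))]
    simp only [pvTokSt]
    conv_rhs => rw [pvTok_bq]
    rw [pvSkipTo_found '`' _ t k hfk]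
    have hl : pvLineAt cs (i + 2 + k) = pvLineAt cs i + ((t.take (k+1)).count '\n' : Int) := by
      rw [show i + 2 + k = i + 1 + (k + 1) from by omega, pvLineAtJump hrest (k+1),
          pvLineAtStep hrest, if_neg (by decide)]
    rw [hl]
  case case8 ih =>  -- template literal, no closing backtick
    rename_i stack inStr i t hsome hnf hesc hq hexit
    intro hok hrest
    have hnone : inStr = none := by rcases hok with rfl | rfl | rfl <;> simp_all
    subst hnone
    rw [ih (Or.inl rfl) (by simp)]
    rw [pvTokSt_nil]
    simp only [pvTokSt]
    conv_rhs => rw [pvTok_bq]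
    rw [pvSkipTo_notfound '`' _ t (by simpa using hnf)]
    rw [pvTok_nil]
  case case9 ih =>  -- line comment ending in a newline
    rename_i stack inStr i ch t hesc hq hexit hsome hbq hsl hfound
    intro hok hrest
    have hnone : inStr = none := by rcases hok with rfl | rfl | rfl <;> simp_all
    subst hnone
    obtain ⟨rfl, hhd⟩ := hsl
    have hcons : PySem.Chars.find ('/' :: t) ['\n'] =
        if PySem.Chars.find t ['\n'] = -1 then -1 else PySem.Chars.find t ['\n'] + 1 := by
      rw [pvFindCons, pvPrefOne]
      rw [if_neg (by decide)]
    have htnf : PySem.Chars.find t ['\n'] ≠ -1 := by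
      intro hh; rw [hcons, if_pos hh] at hfound; exact hfound rfl
    set k : Nat := (PySem.Chars.find t ['\n']).toNat with hk
    have hfk : PySem.Chars.find t ['\n'] = (k : Int) := pvFindNat _ _ htnf
    have htn : (PySem.Chars.find ('/' :: t) ['\n']).toNat = k + 1 := by
      rw [hcons, if_neg htnf, hfk]; omega
    rw [htn] at ih ⊢
    rw [ih (Or.inl rfl) (by
      rw [show i + (k + 1) + 1 = i + 1 + (k + 1) from by omega,
          show k + 1 + 1 = (k + 1) + 1 from rfl, List.drop_succ_cons]
      exact pvDropAdd hrest (k + 1))]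
    simp only [pvTokSt, List.drop_succ_cons]
    conv_rhs => rw [pvTok_sl _ _ hhd]
    rw [pvSkipTo_found '\n' _ t k hfk]
    have hl : pvLineAt cs (i + (k + 1) + 1) =
        pvLineAt cs i + ((t.take (k+1)).count '\n' : Int) := by
      rw [show i + (k + 1) + 1 = i + 1 + (k + 1) from by omega, pvLineAtJump hrest (k+1),
          pvLineAtStep hrest, if_neg (by decide)]
    rw [hl]
  case case10 ih =>  -- line comment running to end of file
    rename_i stack inStr i ch t hesc hq hexit hsome hbq hsl hnf
    intro hok hrest
    have hnone : inStr = none := by rcases hok with rfl | rfl | rfl <;> simp_all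
    subst hnone
    obtain ⟨rfl, hhd⟩ := hsl
    simp only [ne_eq, not_not] at hnf
    have htnf : PySem.Chars.find t ['\n'] = -1 := by
      rw [pvFindCons, pvPrefOne, if_neg (by decide)] at hnf
      by_cases hh : PySem.Chars.find t ['\n'] = -1
      · exact hh
      · rw [if_neg hh] at hnf
        rcases pvFindLB ['\n'] t with h1 | h1
        · exact h1
        · omega
    rw [ih (Or.inl rfl) (by simp)]
    rw [pvTokSt_nil]
    simp only [pvTokSt]
    conv_rhs => rw [pvTok_sl _ _ hhd]
    rw [pvSkipTo_notfound '\n' _ t htnf]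
    rw [pvTok_nil]
  case case11 ih =>  -- block comment with a closing */
    rename_i stack inStr i ch t hesc hq hexit hsome hbq hns hbl hfound
    intro hok hrest
    have hnone : inStr = none := by rcases hok with rfl | rfl | rfl <;> simp_all
    subst hnone
    obtain ⟨rfl, hhd⟩ := hbl
    set k : Nat := (PySem.Chars.find (t.drop 1) ['*', '/']).toNat with hk
    have hfk : PySem.Chars.find (t.drop 1) ['*', '/'] = (k : Int) := pvFindNat _ _ hfound
    obtain ⟨t2, rfl⟩ : ∃ t2, t = '*' :: t2 := by
      cases t with
      | nil => simp at hhd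
      | cons a b =>
        simp only [List.head?_cons] at hhd
        exact ⟨b, by rw [Option.some.inj hhd]⟩
    simp only [List.drop_succ_cons, List.drop_zero] at hfk
    rw [ih (Or.inl rfl) (by
      rw [show i + 4 + k = i + 1 + (k + 3) from by omega,
          show k + 3 = (k + 2) + 1 from rfl, List.drop_succ_cons]
      have := pvDropAdd hrest (k + 3)
      simpa [show k + 3 = (k + 2) + 1 from rfl] using this)]
    simp only [pvTokSt, List.drop_succ_cons, List.drop_zero]
    conv_rhs => rw [pvTok_bl _ _ (by rfl)]
    simp only [List.drop_succ_cons, List.drop_zero]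
    rw [pvSkipBlock_found _ t2 k hfk]
    have hpre : ['*', '/'] <+: t2.drop k := by
      have h0 : (0 : Int) ≤ PySem.Chars.find t2 ['*', '/'] := by rw [hfk]; omega
      have hs := (PySem.Chars.find_spec (s := t2) (sub := ['*', '/']) h0).1
      rwa [hfk, Int.toNat_natCast] at hs
    have hcnt : ((('*' :: t2).take (k + 3)).count '\n' : Int) = ((t2.take k).count '\n' : Int) := by
      obtain ⟨r, hr⟩ := hpre
      have h2 : t2.take (k + 2) = t2.take k ++ (t2.drop k).take 2 := by
        rw [← List.take_add]
      rw [show k + 3 = (k + 2) + 1 from rfl, List.take_succ_cons, h2, ← hr]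
      rw [List.count_cons, List.count_append]
      norm_num [if_neg (show ¬('*' = '\n') from by decide)]
    have hl : pvLineAt cs (i + 4 + k) = pvLineAt cs i + ((t2.take k).count '\n' : Int) := by
      rw [show i + 4 + k = i + 1 + (k + 3) from by omega, pvLineAtJump hrest (k+3),
          pvLineAtStep hrest, if_neg (by decide), ← hcnt]
    rw [hl]
  case case12 ih =>  -- block comment running to end of file
    rename_i stack inStr i ch t hesc hq hexit hsome hbq hns hbl hnf
    intro hok hrest
    have hnone : inStr = none := by rcases hok with rfl | rfl | rfl <;> simp_all
    subst hnone
    obtain ⟨rfl, hhd⟩ := hbl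
    simp only [ne_eq, not_not] at hnf
    rw [ih (Or.inl rfl) (by simp)]
    rw [pvTokSt_nil]
    simp only [pvTokSt]
    conv_rhs => rw [pvTok_bl _ _ hhd]
    rw [pvSkipBlock_notfound _ _ hnf]
    rw [pvTok_nil]
  case case13 ih =>  -- opening bracket
    rename_i stack inStr i ch t hesc hq hexit hsome hbq hns hnb hop
    intro hok hrest
    have hnone : inStr = none := by rcases hok with rfl | rfl | rfl <;> simp_all
    subst hnone
    have hnq : ¬(ch = '"' ∨ ch = '\'') := fun hh => hq ⟨hh, rfl⟩
    rw [ih (Or.inl rfl) (pvDropSucc hrest)]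
    have hl : pvLineAt cs (i + 1) = pvLineAt cs i := by
      rw [pvLineAtStep hrest]
      rcases hop with rfl | rfl | rfl <;> rw [if_neg (by decide)]
    rw [hl]
    simp only [pvTokSt]
    conv_rhs => rw [pvTok_ord _ _ _ (by rcases hop with rfl | rfl | rfl <;> decide) hnq hbq hns hnb]
    rw [if_pos (by rcases hop with rfl | rfl | rfl <;> simp)]
    conv_rhs => simp only [pvMatchB]
    rw [if_neg (by rcases hop with rfl | rfl | rfl <;> decide)]
    simp [pvMapStk]
  case case14 ih =>  -- matching closer
    rename_i inStr i ch t hesc hq hexit hsome hbq hns hnb hnop hcl pos tail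
    intro hok hrest
    have hnone : inStr = none := by rcases hok with rfl | rfl | rfl <;> simp_all
    subst hnone
    have hnq : ¬(ch = '"' ∨ ch = '\'') := fun hh => hq ⟨hh, rfl⟩
    rw [ih (Or.inl rfl) (pvDropSucc hrest)]
    have hl : pvLineAt cs (i + 1) = pvLineAt cs i := by
      rw [pvLineAtStep hrest]
      rcases hcl with rfl | rfl | rfl <;> rw [if_neg (by decide)]
    rw [hl]
    simp only [pvTokSt]
    conv_rhs => rw [pvTok_ord _ _ _ (by rcases hcl with rfl | rfl | rfl <;> decide) hnq hbq hns hnb]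
    rw [if_pos (by rcases hcl with rfl | rfl | rfl <;> simp)]
    rcases hcl with rfl | rfl | rfl <;>
      · conv_rhs => simp only [pvMatchB]
        simp [pvMapStk]
  case case15 =>  -- unexpected closer (wrong opener on the stack)
    rename_i inStr i ch t hesc hq hexit hsome hbq hns hnb hnop hcl top pos tail hmat
    intro hok hrest
    have hnone : inStr = none := by rcases hok with rfl | rfl | rfl <;> simp_all
    subst hnone
    have hnq : ¬(ch = '"' ∨ ch = '\'') := fun hh => hq ⟨hh, rfl⟩
    simp only [pvTokSt]
    conv_rhs => rw [pvTok_ord _ _ _ (by rcases hcl with rfl | rfl | rfl <;> decide) hnq hbq hns hnb]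
    rw [if_pos (by rcases hcl with rfl | rfl | rfl <;> simp)]
    conv_rhs => simp only [pvMatchB]
    rw [if_pos hcl]
    simp only [pvMapStk, List.map_cons]
    rw [if_neg hmat]
    rw [pvMsgA_eq_B_unexpected]
  case case16 =>  -- unexpected closer (empty stack)
    rename_i inStr i ch t hesc hq hexit hsome hbq hns hnb hnop hcl
    intro hok hrest
    have hnone : inStr = none := by rcases hok with rfl | rfl | rfl <;> simp_all
    subst hnone
    have hnq : ¬(ch = '"' ∨ ch = '\'') := fun hh => hq ⟨hh, rfl⟩
    simp only [pvTokSt]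
    conv_rhs => rw [pvTok_ord _ _ _ (by rcases hcl with rfl | rfl | rfl <;> decide) hnq hbq hns hnb]
    rw [if_pos (by rcases hcl with rfl | rfl | rfl <;> simp)]
    conv_rhs => simp only [pvMatchB]
    rw [if_pos hcl]
    simp only [pvMapStk, List.map_nil]
    rw [pvMsgA_eq_B_unexpected]
  case case17 ih =>  -- any other character
    rename_i stack inStr i ch t hesc hq hexit hsome hbq hns hnb hnop hncl
    intro hok hrest
    have hnone : inStr = none := by rcases hok with rfl | rfl | rfl <;> simp_all
    subst hnone
    rw [ih (Or.inl rfl) (pvDropSucc hrest)]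
    simp only [pvTokSt]
    rw [pvLineAtStep hrest]
    have hnq : ¬(ch = '"' ∨ ch = '\'') := fun hh => hq ⟨hh, rfl⟩
    by_cases hn : ch = '\n'
    · subst hn
      rw [if_pos rfl]
      conv_rhs => rw [pvTok_nl]
    · rw [if_neg hn]
      conv_rhs => rw [pvTok_ord _ _ _ hn hnq hbq hns hnb]
      rw [if_neg (by
        rintro (h | h | h | h | h | h)
        · exact hnop (Or.inl h)
        · exact hncl (Or.inl h)
        · exact hnop (Or.inr (Or.inl h))
        · exact hncl (Or.inr (Or.inl h))
        · exact hnop (Or.inr (Or.inr h))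
        · exact hncl (Or.inr (Or.inr h)))]

-- ===== VERDICT (by name: the statement is the Claim_ definition above) =====
theorem check_bracket_balance_py_spec : Claim_equal_check_bracket_balance_py := by
  intro code label _
  unfold Spec_check_bracket_balance_py check_bracket_balance_py check_bracket_balance_py_alt
  have h := pvMain label code.toList [] none 0 code.toList (Or.inl rfl) rfl
  simpa [pvTokSt, pvMapStk, pvLineAt] using h
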